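-- pv_equiv track=rewrite | github.com/andylilfs0217/leet_code | hard/2312_selling_pieces_of_wood.py | sellingWood3
-- ===== SOURCE A (Python) =====
-- from typing import List
--
-- def sellingWood3(m: int, n: int, prices: List[List[int]]) -> int:
--     dp = [[0 for _ in range(n+1)] for _ in range(m+1)]
--     for h, w, price in prices:
--         dp[h][w] = price
--     for i in range(1, m+1):
--         for j in range(1, n+1):
--             for ni in range(1, i//2+1):
--                 dp[i][j] = max(dp[i][j], dp[ni][j] + dp[i-ni][j])
--             for nj in range(1, j//2+1):
--                 dp[i][j] = max(dp[i][j], dp[i][nj] + dp[i][j-nj])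
--     return dp[-1][-1]
-- ===== SOURCE B (Python) =====
-- def sellingWood3(m, n, prices):
--     price = [[0] * (n + 1) for _ in range(m + 1)]
--     for h, w, p in prices:
--         price[h][w] = p
--     memo = {}
--
--     def best(i, j):
--         if (i, j) in memo:
--             return memo[(i, j)]
--         v = price[i][j]
--         for ni in range(1, i // 2 + 1):
--             v = max(v, best(ni, j) + best(i - ni, j))
--         for nj in range(1, j // 2 + 1):
--             v = max(v, best(i, nj) + best(i, j - nj))
--         memo[(i, j)] = v
--         return v
--
--     return best(m, n)
-- ===== Notes on version B (the rewrite author's own statement) =====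
-- stated objective: alternative
-- what changed: Bottom-up triple-loop table DP replaced by top-down memoized recursion (price table seeded once, then a cached best(i,j) over splits), computing only states reachable from (m,n); Pre_ restricts inputs to the task's natural domain (m,n >= 0, rows are triples indexing the (m+1)x(n+1) table, and a zero-dimension block beyond the trivial sizes m,n <= 1 carries only nonnegatively-priced full-block pieces), since outside it A raises or returns the seeded entry of a zero-width row/column its loops never recompute.
-- outside the precondition, e.g. on sellingWood3(2, 0, [[1, 0, 5]]): A returns 0, B returns 10; on sellingWood3(0, 2, [[0, 2, -5]]): A returns -5, B returns 0
import Mathlib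
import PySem

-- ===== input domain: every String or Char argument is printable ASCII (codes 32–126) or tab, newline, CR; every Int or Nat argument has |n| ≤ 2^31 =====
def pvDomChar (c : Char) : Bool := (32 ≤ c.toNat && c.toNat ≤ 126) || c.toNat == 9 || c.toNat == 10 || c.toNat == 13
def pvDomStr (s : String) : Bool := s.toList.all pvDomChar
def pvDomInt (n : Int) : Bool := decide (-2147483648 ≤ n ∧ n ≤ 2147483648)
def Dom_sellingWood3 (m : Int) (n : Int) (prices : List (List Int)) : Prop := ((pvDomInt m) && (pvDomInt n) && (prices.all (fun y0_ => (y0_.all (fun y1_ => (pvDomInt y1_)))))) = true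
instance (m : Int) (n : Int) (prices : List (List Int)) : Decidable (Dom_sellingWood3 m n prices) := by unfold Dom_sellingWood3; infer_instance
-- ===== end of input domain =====

-- B replaces A's bottom-up triple-loop table DP by top-down memoized recursion over a (h,w)→price dict (objective: alternative decomposition, same cost).

-- ===== PORT A =====
-- dp[i][j] (read): total forms pyGetD are exact on the in-range/in-shape inputs Pre_ admits
def pvCell (dp : List (List Int)) (i : Int) (j : Int) : Int :=
  PySem.List.pyGetD (PySem.List.pyGetD dp i []) j 0

-- dp[i][j] = v (assignment): pySetD is exact where Python's index assignment succeeds (Pre_)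
def pvSetCell (dp : List (List Int)) (i : Int) (j : Int) (v : Int) : List (List Int) :=
  PySem.List.pySetD dp i (PySem.List.pySetD (PySem.List.pyGetD dp i []) j v)

-- one `dp[h][w] = price` seeding step (Python raises ValueError on a row that is not a triple; excluded by Pre_)
def pvSeedStep (dp : List (List Int)) (row : List Int) : List (List Int) :=
  match row with
  | [h, w, price] => pvSetCell dp h w price
  | _ => dp

def sellingWood3 (m : Int) (n : Int) (prices : List (List Int)) : Int :=
  let dp : List (List Int) := List.replicate (m + 1).toNat (List.replicate (n + 1).toNat 0)
  let dp := prices.foldl pvSeedStep dp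
  let dp := (PySem.List.pyRange 1 (m + 1) 1).foldl (fun dp i =>
    (PySem.List.pyRange 1 (n + 1) 1).foldl (fun dp j =>
      let dp := (PySem.List.pyRange 1 (PySem.Int.floordiv i 2 + 1) 1).foldl (fun dp ni =>
        pvSetCell dp i j (max (pvCell dp i j) (pvCell dp ni j + pvCell dp (i - ni) j))) dp
      (PySem.List.pyRange 1 (PySem.Int.floordiv j 2 + 1) 1).foldl (fun dp nj =>
        pvSetCell dp i j (max (pvCell dp i j) (pvCell dp i nj + pvCell dp i (j - nj)))) dp) dp) dp
  pvCell dp (-1) (-1)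

-- ===== PORT B =====
-- Source B's recursive `best` with its memo dict threaded through; `price[i][j]` is pvCell
-- (total form; exact on the in-range reads Pre_ admits); the Nat fuel only establishes
-- termination (it never runs out on the calls sellingWood3_alt makes)
def pvBest (pr : List (List Int)) :
    Nat → Int → Int → PySem.Dict (Int × Int) Int → Int × PySem.Dict (Int × Int) Int
  | 0, i, j, memo =>
    match memo.get? (i, j) with
    | some v => (v, memo)
    | none => (pvCell pr i j, memo)
  | fuel + 1, i, j, memo =>
    match memo.get? (i, j) with
    | some v => (v, memo)
    | none =>
      let v0 := pvCell pr i j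
      let s1 := (PySem.List.pyRange 1 (PySem.Int.floordiv i 2 + 1) 1).foldl
        (fun (st : Int × PySem.Dict (Int × Int) Int) ni =>
          let r1 := pvBest pr fuel ni j st.2
          let r2 := pvBest pr fuel (i - ni) j r1.2
          (max st.1 (r1.1 + r2.1), r2.2)) (v0, memo)
      let s2 := (PySem.List.pyRange 1 (PySem.Int.floordiv j 2 + 1) 1).foldl
        (fun (st : Int × PySem.Dict (Int × Int) Int) nj =>
          let r1 := pvBest pr fuel i nj st.2
          let r2 := pvBest pr fuel i (j - nj) r1.2
          (max st.1 (r1.1 + r2.1), r2.2)) s1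
      (s2.1, s2.2.insert (i, j) s2.1)

def sellingWood3_alt (m : Int) (n : Int) (prices : List (List Int)) : Int :=
  let price : List (List Int) := List.replicate (m + 1).toNat (List.replicate (n + 1).toNat 0)
  let price := prices.foldl pvSeedStep price
  (pvBest price (m + n).toNat m n PySem.Dict.empty).1

-- ===== PRECONDITION & SPEC =====
-- Pre_ is the task's natural domain: m,n ≥ 0, every prices row a triple [h,w,p] whose
-- coordinates index the (m+1)×(n+1) table (Python indexing, so -(m+1) ≤ h ≤ m and
-- -(n+1) ≤ w ≤ n), and — when the block has a zero dimension (m = 0 or n = 0) beyond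
-- the trivial sizes m,n ≤ 1 — only nonnegatively-priced pieces of exactly the block's
-- own size.  Outside it A either raises (IndexError/ValueError) or, on zero-area
-- blocks with other priced pieces, returns the seeded table entry of a zero-width
-- row/column that its loops never recompute — a corner outside the task's specification.
def Pre_sellingWood3 (m : Int) (n : Int) (prices : List (List Int)) : Prop :=
  0 ≤ m ∧ 0 ≤ n ∧
  ((m = 0 ∨ n = 0) → ((m ≤ 1 ∧ n ≤ 1) ∨
    ∀ row ∈ prices, row.getD 0 0 = m ∧ row.getD 1 0 = n ∧ 0 ≤ row.getD 2 0)) ∧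
  ∀ row ∈ prices, row.length = 3 ∧
    -(m + 1) ≤ row.getD 0 0 ∧ row.getD 0 0 ≤ m ∧ -(n + 1) ≤ row.getD 1 0 ∧ row.getD 1 0 ≤ n
instance (m : Int) (n : Int) (prices : List (List Int)) : Decidable (Pre_sellingWood3 m n prices) := by
  unfold Pre_sellingWood3; infer_instance

def pvWitness_sellingWood3 : Int × Int × List (List Int) := (2, 2, [[1, 1, 3], [2, 2, 10]])

def Spec_sellingWood3 (m : Int) (n : Int) (prices : List (List Int)) (out : Int) : Prop :=
  out = sellingWood3_alt m n prices
instance (m : Int) (n : Int) (prices : List (List Int)) (out : Int) : Decidable (Spec_sellingWood3 m n prices out) := by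
  unfold Spec_sellingWood3; infer_instance

-- ===== CLAIM (what is proved, stated in full; the proofs are below) =====
def Claim_equal_sellingWood3 : Prop := ∀ (m : Int) (n : Int) (prices : List (List Int)), Dom_sellingWood3 m n prices → Pre_sellingWood3 m n prices → Spec_sellingWood3 m n prices (sellingWood3 m n prices)



-- ===== LEMMAS AND PROOFS =====

-- the pure (memo-free) value of Source B's `best`, with explicit fuel
def pvBW (p : Int → Int → Int) : Nat → Int → Int → Int
  | 0, i, j => p i j
  | f + 1, i, j =>
    let v1 := (PySem.List.pyRange 1 (PySem.Int.floordiv i 2 + 1) 1).foldl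
      (fun acc ni => max acc (pvBW p f ni j + pvBW p f (i - ni) j)) (p i j)
    (PySem.List.pyRange 1 (PySem.Int.floordiv j 2 + 1) 1).foldl
      (fun acc nj => max acc (pvBW p f i nj + pvBW p f i (j - nj))) v1

-- the canonical optimum: fuel (i+j).toNat always suffices
def pvB (p : Int → Int → Int) (i j : Int) : Int := pvBW p (i + j).toNat i j

theorem pvBW_step (p : Int → Int → Int) (f : Nat) (i j : Int) :
    pvBW p (f + 1) i j =
      (PySem.List.pyRange 1 (PySem.Int.floordiv j 2 + 1) 1).foldl
        (fun acc nj => max acc (pvBW p f i nj + pvBW p f i (j - nj)))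
        ((PySem.List.pyRange 1 (PySem.Int.floordiv i 2 + 1) 1).foldl
          (fun acc ni => max acc (pvBW p f ni j + pvBW p f (i - ni) j)) (p i j)) := rfl

theorem pvMemRange {i x : Int} (hi : 0 ≤ i)
    (hx : x ∈ PySem.List.pyRange 1 (PySem.Int.floordiv i 2 + 1) 1) :
    1 ≤ x ∧ 2 ≤ i ∧ x < i ∧ 1 ≤ i - x ∧ i - x < i := by
  have h := (PySem.List.mem_pyRange_one).1 hx
  rw [PySem.Int.floordiv_eq_ediv_of_pos (by omega)] at h
  omega

theorem pvRangeZero : PySem.List.pyRange 1 (PySem.Int.floordiv 0 2 + 1) 1 = [] := by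
  rw [PySem.Int.floordiv_eq_ediv_of_pos (by omega)]
  exact PySem.List.pyRange_one_eq_nil (by omega)

theorem pvBW_succ (p : Int → Int → Int) :
    ∀ (f : Nat) (i j : Int), 0 ≤ i → 0 ≤ j → (i + j).toNat ≤ f →
      pvBW p (f + 1) i j = pvBW p f i j := by
  intro f
  induction f with
  | zero =>
    intro i j hi hj hf
    have hi0 : i = 0 := by omega
    have hj0 : j = 0 := by omega
    subst hi0; subst hj0
    rw [pvBW_step, pvRangeZero]
    simp only [List.foldl_nil]
    rfl
  | succ g IH =>
    intro i j hi hj hf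
    rw [pvBW_step p (g + 1) i j, pvBW_step p g i j]
    have h1 : (PySem.List.pyRange 1 (PySem.Int.floordiv i 2 + 1) 1).foldl
        (fun acc ni => max acc (pvBW p (g + 1) ni j + pvBW p (g + 1) (i - ni) j)) (p i j)
      = (PySem.List.pyRange 1 (PySem.Int.floordiv i 2 + 1) 1).foldl
        (fun acc ni => max acc (pvBW p g ni j + pvBW p g (i - ni) j)) (p i j) := by
      apply PySem.List.foldl_congr_mem
      intro acc x hx
      obtain ⟨h1x, h2i, h3x, h4x, h5x⟩ := pvMemRange hi hx
      rw [IH x j (by omega) hj (by omega), IH (i - x) j (by omega) hj (by omega)]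
    rw [h1]
    apply PySem.List.foldl_congr_mem
    intro acc x hx
    obtain ⟨h1x, h2j, h3x, h4x, h5x⟩ := pvMemRange hj hx
    rw [IH i x hi (by omega) (by omega), IH i (j - x) hi (by omega) (by omega)]

theorem pvBW_eq_pvB (p : Int → Int → Int) :
    ∀ (f : Nat) (i j : Int), 0 ≤ i → 0 ≤ j → (i + j).toNat ≤ f →
      pvBW p f i j = pvB p i j := by
  intro f
  induction f with
  | zero =>
    intro i j hi hj hf
    have : (i + j).toNat = 0 := by omega
    rw [pvB, this]
  | succ g IH =>
    intro i j hi hj hf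
    by_cases h : (i + j).toNat ≤ g
    · rw [pvBW_succ p g i j hi hj h, IH i j hi hj h]
    · have : (i + j).toNat = g + 1 := by omega
      rw [pvB, this]

theorem pvB_unfold (p : Int → Int → Int) (i j : Int) (hi : 0 ≤ i) (hj : 0 ≤ j) :
    pvB p i j =
      (PySem.List.pyRange 1 (PySem.Int.floordiv j 2 + 1) 1).foldl
        (fun acc nj => max acc (pvB p i nj + pvB p i (j - nj)))
        ((PySem.List.pyRange 1 (PySem.Int.floordiv i 2 + 1) 1).foldl
          (fun acc ni => max acc (pvB p ni j + pvB p (i - ni) j)) (p i j)) := by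
  cases ht : (i + j).toNat with
  | zero =>
    have hi0 : i = 0 := by omega
    have hj0 : j = 0 := by omega
    subst hi0; subst hj0
    rw [pvB, ht, pvRangeZero]
    simp only [List.foldl_nil]
    rfl
  | succ g =>
    have : pvB p i j = pvBW p (g + 1) i j := by rw [pvB, ht]
    rw [this, pvBW_step p g i j]
    have h1 : (PySem.List.pyRange 1 (PySem.Int.floordiv i 2 + 1) 1).foldl
        (fun acc ni => max acc (pvBW p g ni j + pvBW p g (i - ni) j)) (p i j)
      = (PySem.List.pyRange 1 (PySem.Int.floordiv i 2 + 1) 1).foldl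
        (fun acc ni => max acc (pvB p ni j + pvB p (i - ni) j)) (p i j) := by
      apply PySem.List.foldl_congr_mem
      intro acc x hx
      obtain ⟨h1x, h2i, h3x, h4x, h5x⟩ := pvMemRange hi hx
      rw [pvBW_eq_pvB p g x j (by omega) hj (by omega),
        pvBW_eq_pvB p g (i - x) j (by omega) hj (by omega)]
    rw [h1]
    apply PySem.List.foldl_congr_mem
    intro acc x hx
    obtain ⟨h1x, h2j, h3x, h4x, h5x⟩ := pvMemRange hj hx
    rw [pvBW_eq_pvB p g i x hi (by omega) (by omega),
      pvBW_eq_pvB p g i (j - x) hi (by omega) (by omega)]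

theorem pvFoldMaxId : ∀ (L : List Int) (a : Int), 0 ≤ a →
    L.foldl (fun (acc : Int) (_ : Int) => max acc (0 + 0)) a = a := by
  intro L
  induction L with
  | nil => intro a _; rfl
  | cons x xs IH =>
    intro a ha
    simp only [List.foldl_cons]
    rw [show max a ((0:Int) + 0) = a by omega]
    exact IH a ha

-- on a zero-height block every cell strictly left of (0, n) is worth 0
theorem pvBW_degRow (p : Int → Int → Int) (n : Int) (hp : ∀ b : Int, 0 ≤ b → b < n → p 0 b = 0) :
    ∀ (f : Nat) (k : Int), 0 ≤ k → k < n → pvBW p f 0 k = 0 := by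
  intro f
  induction f with
  | zero => intro k hk0 hk; exact hp k hk0 hk
  | succ g IH =>
    intro k hk0 hkn
    rw [pvBW_step, pvRangeZero, List.foldl_nil, hp k hk0 hkn]
    have e := PySem.List.foldl_congr_mem (PySem.List.pyRange 1 (PySem.Int.floordiv k 2 + 1) 1)
      (fun acc nj => max acc (pvBW p g 0 nj + pvBW p g 0 (k - nj)))
      (fun acc _ => max acc (0 + 0)) 0
      (fun acc x hx => by
        obtain ⟨k1, k2, k3, k4, k5⟩ := pvMemRange hk0 hx
        show max acc (pvBW p g 0 x + pvBW p g 0 (k - x)) = max acc (0 + 0)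
        rw [IH x (by omega) (by omega), IH (k - x) (by omega) (by omega)])
    rw [e]
    exact pvFoldMaxId _ 0 (le_refl 0)

theorem pvBW_degCol (p : Int → Int → Int) (m : Int) (hp : ∀ a : Int, 0 ≤ a → a < m → p a 0 = 0) :
    ∀ (f : Nat) (k : Int), 0 ≤ k → k < m → pvBW p f k 0 = 0 := by
  intro f
  induction f with
  | zero => intro k hk0 hk; exact hp k hk0 hk
  | succ g IH =>
    intro k hk0 hkm
    rw [pvBW_step, pvRangeZero, List.foldl_nil]
    rw [hp k hk0 hkm]
    have e := PySem.List.foldl_congr_mem (PySem.List.pyRange 1 (PySem.Int.floordiv k 2 + 1) 1)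
      (fun acc ni => max acc (pvBW p g ni 0 + pvBW p g (k - ni) 0))
      (fun acc _ => max acc (0 + 0)) 0
      (fun acc x hx => by
        obtain ⟨k1, k2, k3, k4, k5⟩ := pvMemRange hk0 hx
        show max acc (pvBW p g x 0 + pvBW p g (k - x) 0) = max acc (0 + 0)
        rw [IH x (by omega) (by omega), IH (k - x) (by omega) (by omega)])
    rw [e]
    exact pvFoldMaxId _ 0 (le_refl 0)

theorem pvB_degRow (p : Int → Int → Int) (n : Int) (hp : ∀ b : Int, 0 ≤ b → b < n → p 0 b = 0)
    (hn : 0 ≤ n) (hpos : 0 ≤ p 0 n) : pvB p 0 n = p 0 n := by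
  rw [pvB_unfold p 0 n (le_refl 0) hn, pvRangeZero, List.foldl_nil]
  have e := PySem.List.foldl_congr_mem (PySem.List.pyRange 1 (PySem.Int.floordiv n 2 + 1) 1)
    (fun acc nj => max acc (pvB p 0 nj + pvB p 0 (n - nj)))
    (fun acc _ => max acc (0 + 0)) (p 0 n)
    (fun acc x hx => by
      obtain ⟨k1, k2, k3, k4, k5⟩ := pvMemRange hn hx
      show max acc (pvB p 0 x + pvB p 0 (n - x)) = max acc (0 + 0)
      rw [pvB, pvB, pvBW_degRow p n hp _ x (by omega) (by omega),
        pvBW_degRow p n hp _ (n - x) (by omega) (by omega)])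
  rw [e]
  exact pvFoldMaxId _ _ hpos

theorem pvB_degCol (p : Int → Int → Int) (m : Int) (hp : ∀ a : Int, 0 ≤ a → a < m → p a 0 = 0)
    (hm : 0 ≤ m) (hpos : 0 ≤ p m 0) : pvB p m 0 = p m 0 := by
  rw [pvB_unfold p m 0 hm (le_refl 0)]
  have e := PySem.List.foldl_congr_mem (PySem.List.pyRange 1 (PySem.Int.floordiv m 2 + 1) 1)
    (fun acc ni => max acc (pvB p ni 0 + pvB p (m - ni) 0))
    (fun acc _ => max acc (0 + 0)) (p m 0)
    (fun acc x hx => by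
      obtain ⟨k1, k2, k3, k4, k5⟩ := pvMemRange hm hx
      show max acc (pvB p x 0 + pvB p (m - x) 0) = max acc (0 + 0)
      rw [pvB, pvB, pvBW_degCol p m hp _ x (by omega) (by omega),
        pvBW_degCol p m hp _ (m - x) (by omega) (by omega)])
  rw [e, pvRangeZero, List.foldl_nil]
  exact pvFoldMaxId _ _ hpos

theorem pvB_small (p : Int → Int → Int) (i j : Int) (hi0 : 0 ≤ i) (hi1 : i ≤ 1)
    (hj0 : 0 ≤ j) (hj1 : j ≤ 1) : pvB p i j = p i j := by
  have hdi : PySem.Int.floordiv i 2 = 0 := by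
    rw [PySem.Int.floordiv_eq_ediv_of_pos (by omega)]
    omega
  have hdj : PySem.Int.floordiv j 2 = 0 := by
    rw [PySem.Int.floordiv_eq_ediv_of_pos (by omega)]
    omega
  rw [pvB_unfold p i j hi0 hj0, hdi, hdj,
    PySem.List.pyRange_one_eq_nil (by omega), List.foldl_nil, List.foldl_nil]

def pvGood (p : Int → Int → Int) (memo : PySem.Dict (Int × Int) Int) : Prop :=
  ∀ (k : Int × Int) (v : Int), memo.get? k = some v → v = pvB p k.1 k.2

-- the ni-loop / nj-loop step functions of pvBest, with the lets expanded
def pvStepNi (pr : List (List Int)) (g : Nat) (i j : Int)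
    (st : Int × PySem.Dict (Int × Int) Int) (ni : Int) : Int × PySem.Dict (Int × Int) Int :=
  (max st.1 ((pvBest pr g ni j st.2).1 + (pvBest pr g (i - ni) j (pvBest pr g ni j st.2).2).1),
   (pvBest pr g (i - ni) j (pvBest pr g ni j st.2).2).2)

def pvStepNj (pr : List (List Int)) (g : Nat) (i j : Int)
    (st : Int × PySem.Dict (Int × Int) Int) (nj : Int) : Int × PySem.Dict (Int × Int) Int :=
  (max st.1 ((pvBest pr g i nj st.2).1 + (pvBest pr g i (j - nj) (pvBest pr g i nj st.2).2).1),
   (pvBest pr g i (j - nj) (pvBest pr g i nj st.2).2).2)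

theorem pvBest_hit (pr : List (List Int)) (f : Nat) (i j : Int)
    (memo : PySem.Dict (Int × Int) Int) (v : Int) (h : memo.get? (i, j) = some v) :
    pvBest pr f i j memo = (v, memo) := by
  cases f <;> simp only [pvBest, h]

theorem pvBest_zero_miss (pr : List (List Int)) (i j : Int)
    (memo : PySem.Dict (Int × Int) Int) (h : memo.get? (i, j) = none) :
    pvBest pr 0 i j memo = (pvCell pr i j, memo) := by
  simp only [pvBest, h]

theorem pvBest_succ_miss (pr : List (List Int)) (g : Nat) (i j : Int)
    (memo : PySem.Dict (Int × Int) Int) (h : memo.get? (i, j) = none) :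
    pvBest pr (g + 1) i j memo =
      (((PySem.List.pyRange 1 (PySem.Int.floordiv j 2 + 1) 1).foldl (pvStepNj pr g i j)
          ((PySem.List.pyRange 1 (PySem.Int.floordiv i 2 + 1) 1).foldl (pvStepNi pr g i j)
            (pvCell pr i j, memo))).1,
       ((PySem.List.pyRange 1 (PySem.Int.floordiv j 2 + 1) 1).foldl (pvStepNj pr g i j)
          ((PySem.List.pyRange 1 (PySem.Int.floordiv i 2 + 1) 1).foldl (pvStepNi pr g i j)
            (pvCell pr i j, memo))).2.insert (i, j)
        ((PySem.List.pyRange 1 (PySem.Int.floordiv j 2 + 1) 1).foldl (pvStepNj pr g i j)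
          ((PySem.List.pyRange 1 (PySem.Int.floordiv i 2 + 1) 1).foldl (pvStepNi pr g i j)
            (pvCell pr i j, memo))).1) := by
  simp only [pvBest, h]
  rfl

theorem pvFoldNi (pr : List (List Int)) (g : Nat) (i j : Int) (hj : 0 ≤ j)
    (IH : ∀ (i j : Int) (memo : PySem.Dict (Int × Int) Int),
      pvGood (fun a b => pvCell pr a b) memo → 0 ≤ i → 0 ≤ j → (i + j).toNat ≤ g →
      (pvBest pr g i j memo).1 = pvB (fun a b => pvCell pr a b) i j ∧
      pvGood (fun a b => pvCell pr a b) (pvBest pr g i j memo).2) :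
    ∀ (L : List Int),
      (∀ x ∈ L, 0 ≤ x ∧ (x + j).toNat ≤ g ∧ 0 ≤ i - x ∧ (i - x + j).toNat ≤ g) →
      ∀ (st : Int × PySem.Dict (Int × Int) Int), pvGood (fun a b => pvCell pr a b) st.2 →
      (L.foldl (pvStepNi pr g i j) st).1
        = L.foldl (fun acc ni => max acc (pvB (fun a b => pvCell pr a b) ni j +
            pvB (fun a b => pvCell pr a b) (i - ni) j)) st.1 ∧
      pvGood (fun a b => pvCell pr a b) (L.foldl (pvStepNi pr g i j) st).2 := by
  intro L
  induction L with
  | nil => intro _ st hst; exact ⟨rfl, hst⟩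
  | cons x xs IHL =>
    intro hmem st hst
    obtain ⟨hx0, hxg, hx0', hxg'⟩ := hmem x (List.mem_cons_self ..)
    obtain ⟨e1, g1⟩ := IH x j st.2 hst hx0 hj hxg
    obtain ⟨e2, g2⟩ := IH (i - x) j (pvBest pr g x j st.2).2 g1 hx0' hj hxg'
    simp only [List.foldl_cons]
    have step : pvStepNi pr g i j st x =
        (max st.1 (pvB (fun a b => pvCell pr a b) x j + pvB (fun a b => pvCell pr a b) (i - x) j),
         (pvBest pr g (i - x) j (pvBest pr g x j st.2).2).2) := by
      rw [pvStepNi, e1, e2]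
    rw [step]
    exact IHL (fun y hy => hmem y (List.mem_cons_of_mem _ hy)) _ g2

theorem pvFoldNj (pr : List (List Int)) (g : Nat) (i j : Int) (hi : 0 ≤ i)
    (IH : ∀ (i j : Int) (memo : PySem.Dict (Int × Int) Int),
      pvGood (fun a b => pvCell pr a b) memo → 0 ≤ i → 0 ≤ j → (i + j).toNat ≤ g →
      (pvBest pr g i j memo).1 = pvB (fun a b => pvCell pr a b) i j ∧
      pvGood (fun a b => pvCell pr a b) (pvBest pr g i j memo).2) :
    ∀ (L : List Int),
      (∀ x ∈ L, 0 ≤ x ∧ (i + x).toNat ≤ g ∧ 0 ≤ j - x ∧ (i + (j - x)).toNat ≤ g) →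
      ∀ (st : Int × PySem.Dict (Int × Int) Int), pvGood (fun a b => pvCell pr a b) st.2 →
      (L.foldl (pvStepNj pr g i j) st).1
        = L.foldl (fun acc nj => max acc (pvB (fun a b => pvCell pr a b) i nj +
            pvB (fun a b => pvCell pr a b) i (j - nj))) st.1 ∧
      pvGood (fun a b => pvCell pr a b) (L.foldl (pvStepNj pr g i j) st).2 := by
  intro L
  induction L with
  | nil => intro _ st hst; exact ⟨rfl, hst⟩
  | cons x xs IHL =>
    intro hmem st hst
    obtain ⟨hx0, hxg, hx0', hxg'⟩ := hmem x (List.mem_cons_self ..)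
    obtain ⟨e1, g1⟩ := IH i x st.2 hst hi hx0 hxg
    obtain ⟨e2, g2⟩ := IH i (j - x) (pvBest pr g i x st.2).2 g1 hi hx0' hxg'
    simp only [List.foldl_cons]
    have step : pvStepNj pr g i j st x =
        (max st.1 (pvB (fun a b => pvCell pr a b) i x + pvB (fun a b => pvCell pr a b) i (j - x)),
         (pvBest pr g i (j - x) (pvBest pr g i x st.2).2).2) := by
      rw [pvStepNj, e1, e2]
    rw [step]
    exact IHL (fun y hy => hmem y (List.mem_cons_of_mem _ hy)) _ g2

theorem pvBest_go (pr : List (List Int)) :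
    ∀ (f : Nat) (i j : Int) (memo : PySem.Dict (Int × Int) Int),
      pvGood (fun a b => pvCell pr a b) memo → 0 ≤ i → 0 ≤ j → (i + j).toNat ≤ f →
      (pvBest pr f i j memo).1 = pvB (fun a b => pvCell pr a b) i j ∧
      pvGood (fun a b => pvCell pr a b) (pvBest pr f i j memo).2 := by
  intro f
  induction f with
  | zero =>
    intro i j memo hg hi hj hf
    have hi0 : i = 0 := by omega
    have hj0 : j = 0 := by omega
    subst hi0; subst hj0
    cases h : memo.get? ((0 : Int), (0 : Int)) with
    | some v => rw [pvBest_hit pr 0 0 0 memo v h]; exact ⟨hg (0, 0) v h, hg⟩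
    | none => rw [pvBest_zero_miss pr 0 0 memo h]; exact ⟨rfl, hg⟩
  | succ g IH =>
    intro i j memo hg hi hj hf
    cases h : memo.get? (i, j) with
    | some v => rw [pvBest_hit pr (g + 1) i j memo v h]; exact ⟨hg (i, j) v h, hg⟩
    | none =>
      rw [pvBest_succ_miss pr g i j memo h]
      have hL1 : ∀ x ∈ PySem.List.pyRange 1 (PySem.Int.floordiv i 2 + 1) 1,
          0 ≤ x ∧ (x + j).toNat ≤ g ∧ 0 ≤ i - x ∧ (i - x + j).toNat ≤ g := by
        intro x hx
        obtain ⟨h1, h2, h3, h4, h5⟩ := pvMemRange hi hx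
        exact ⟨by omega, by omega, by omega, by omega⟩
      have hL2 : ∀ x ∈ PySem.List.pyRange 1 (PySem.Int.floordiv j 2 + 1) 1,
          0 ≤ x ∧ (i + x).toNat ≤ g ∧ 0 ≤ j - x ∧ (i + (j - x)).toNat ≤ g := by
        intro x hx
        obtain ⟨h1, h2, h3, h4, h5⟩ := pvMemRange hj hx
        exact ⟨by omega, by omega, by omega, by omega⟩
      obtain ⟨e1, g1⟩ := pvFoldNi pr g i j hj IH _ hL1 (pvCell pr i j, memo) hg
      obtain ⟨e2, g2⟩ := pvFoldNj pr g i j hi IH _ hL2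
        ((PySem.List.pyRange 1 (PySem.Int.floordiv i 2 + 1) 1).foldl (pvStepNi pr g i j)
          (pvCell pr i j, memo)) g1
      have hv : ((PySem.List.pyRange 1 (PySem.Int.floordiv j 2 + 1) 1).foldl (pvStepNj pr g i j)
          ((PySem.List.pyRange 1 (PySem.Int.floordiv i 2 + 1) 1).foldl (pvStepNi pr g i j)
            (pvCell pr i j, memo))).1 = pvB (fun a b => pvCell pr a b) i j := by
        rw [e2, e1, pvB_unfold _ i j hi hj]
      refine ⟨hv, ?_⟩
      intro k v hk
      rw [PySem.Dict.get?_insert] at hk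
      by_cases hke : k = (i, j)
      · subst hke
        rw [if_pos rfl] at hk
        cases hk
        exact hv
      · rw [if_neg hke] at hk
        exact g2 k v hk

theorem pvAlt (m n : Int) (prices : List (List Int)) (hm : 0 ≤ m) (hn : 0 ≤ n) :
    sellingWood3_alt m n prices =
      pvB (fun a b => pvCell
        (prices.foldl pvSeedStep (List.replicate (m + 1).toNat (List.replicate (n + 1).toNat 0))) a b) m n := by
  have hg : pvGood (fun a b => pvCell
      (prices.foldl pvSeedStep (List.replicate (m + 1).toNat (List.replicate (n + 1).toNat 0))) a b)
      PySem.Dict.empty := by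
    intro k v hk
    rw [PySem.Dict.get?_empty] at hk
    cases hk
  exact (pvBest_go _ (m + n).toNat m n PySem.Dict.empty hg hm hn (le_refl _)).1

-- ===== A-side grid lemmas =====

def pvShape (dp : List (List Int)) (M N : Nat) : Prop :=
  dp.length = M ∧ ∀ (a : Nat) (h : a < dp.length), dp[a].length = N

theorem pvCell_eq {dp : List (List Int)} {M N : Nat} (hs : pvShape dp M N) {i j : Int}
    (hi : 0 ≤ i) (hiM : i < (M : Int)) (hj : 0 ≤ j) (hjN : j < (N : Int)) :
    pvCell dp i j = (dp.getD i.toNat []).getD j.toNat 0 := by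
  have hL : dp.length = M := hs.1
  have hlen : i.toNat < dp.length := by omega
  have hrow : dp[i.toNat].length = N := hs.2 _ hlen
  rw [pvCell, PySem.List.pyGetD_eq_getElem dp [] hi (by omega),
    PySem.List.pyGetD_eq_getElem _ 0 hj (by rw [hrow]; omega),
    List.getD_eq_getElem dp [] hlen, List.getD_eq_getElem _ 0 (by rw [hrow]; omega)]

theorem pvSetCell_eq {dp : List (List Int)} {M N : Nat} (hs : pvShape dp M N) {h w : Int} (v : Int)
    (h0 : 0 ≤ h) (hM : h < (M : Int)) (w0 : 0 ≤ w) (wN : w < (N : Int)) :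
    pvSetCell dp h w v = dp.set h.toNat ((dp.getD h.toNat []).set w.toNat v) := by
  have hL : dp.length = M := hs.1
  have hL : dp.length = M := hs.1
  have hlen : h.toNat < dp.length := by omega
  rw [pvSetCell, PySem.List.pyGetD_eq_getElem dp [] h0 (by omega),
    PySem.List.pySetD_of_nonneg _ _ w0, PySem.List.pySetD_of_nonneg _ _ h0,
    List.getD_eq_getElem dp [] hlen]

theorem pvShape_setCell {dp : List (List Int)} {M N : Nat} (hs : pvShape dp M N) {h w : Int} (v : Int)
    (h0 : 0 ≤ h) (hM : h < (M : Int)) (w0 : 0 ≤ w) (wN : w < (N : Int)) :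
    pvShape (pvSetCell dp h w v) M N := by
  have hL : dp.length = M := hs.1
  rw [pvSetCell_eq hs v h0 hM w0 wN]
  have hlen : h.toNat < dp.length := by omega
  refine ⟨by rw [List.length_set]; exact hs.1, ?_⟩
  intro a ha
  rw [List.getElem_set]
  split
  · rw [List.getD_eq_getElem dp [] hlen, List.length_set]
    exact hs.2 _ hlen
  · exact hs.2 _ (by simpa using ha)

theorem pvCell_setCell {dp : List (List Int)} {M N : Nat} (hs : pvShape dp M N) {h w i j : Int} (v : Int)
    (h0 : 0 ≤ h) (hM : h < (M : Int)) (w0 : 0 ≤ w) (wN : w < (N : Int))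
    (i0 : 0 ≤ i) (iM : i < (M : Int)) (j0 : 0 ≤ j) (jN : j < (N : Int)) :
    pvCell (pvSetCell dp h w v) i j = if i = h ∧ j = w then v else pvCell dp i j := by
  have hs' := pvShape_setCell hs v h0 hM w0 wN
  have hL : dp.length = M := hs.1
  have hlen : h.toNat < dp.length := by omega
  have hilen : i.toNat < dp.length := by omega
  have hroww : dp[h.toNat].length = N := hs.2 _ hlen
  have hrowi : dp[i.toNat].length = N := hs.2 _ hilen
  rw [pvCell_eq hs' i0 iM j0 jN, pvCell_eq hs i0 iM j0 jN, pvSetCell_eq hs v h0 hM w0 wN,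
    List.getD_eq_getElem _ [] (by rw [List.length_set]; exact hilen),
    List.getElem_set, List.getD_eq_getElem dp [] hlen, List.getD_eq_getElem dp [] hilen]
  by_cases hih : i = h
  · have hhi : h.toNat = i.toNat := by omega
    rw [if_pos hhi]
    rw [List.getD_eq_getElem _ 0 (by rw [List.length_set, hroww]; omega), List.getElem_set]
    by_cases hjw : j = w
    · rw [if_pos (by omega : w.toNat = j.toNat), if_pos ⟨hih, hjw⟩]
    · rw [if_neg (by omega : ¬ (w.toNat = j.toNat)), if_neg (by tauto),
        List.getD_eq_getElem _ 0 (by rw [hrowi]; omega)]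
      simp only [hhi]
  · rw [if_neg (by omega : ¬ (h.toNat = i.toNat)), if_neg (by tauto)]

theorem pvCell_rep (M N : Nat) (i j : Int) :
    pvCell (List.replicate M (List.replicate N (0 : Int))) i j = 0 := by
  rw [pvCell]
  by_cases h1 : PySem.List.pyGet? (List.replicate M (List.replicate N (0 : Int))) i = none
  · rw [PySem.List.pyGetD_of_none _ _ _ h1]
    by_cases h2 : PySem.List.pyGet? ([] : List Int) j = none
    · rw [PySem.List.pyGetD_of_none _ _ _ h2]
    · exact absurd ((PySem.List.pyGet?_eq_none_iff _ _).2 (by simp [PySem.Raise.InRange])) h2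
  · have hin : PySem.Raise.InRange (List.replicate M (List.replicate N (0 : Int))).length i := by
      by_contra hc
      exact h1 ((PySem.List.pyGet?_eq_none_iff _ _).2 hc)
    have hmem := PySem.List.pyGetD_mem (List.replicate M (List.replicate N (0 : Int)))
      ([] : List Int) (i := i) hin
    rw [List.eq_of_mem_replicate hmem]
    by_cases h2 : PySem.List.pyGet? (List.replicate N (0 : Int)) j = none
    · rw [PySem.List.pyGetD_of_none _ _ _ h2]
    · have hin2 : PySem.Raise.InRange (List.replicate N (0 : Int)).length j := by
        by_contra hc
        exact h2 ((PySem.List.pyGet?_eq_none_iff _ _).2 hc)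
      exact List.eq_of_mem_replicate (PySem.List.pyGetD_mem _ (0 : Int) hin2)

theorem pvShape_rep (m n : Int) :
    pvShape (List.replicate (m + 1).toNat (List.replicate (n + 1).toNat (0 : Int)))
      (m + 1).toNat (n + 1).toNat := by
  refine ⟨List.length_replicate, ?_⟩
  intro a h
  rw [List.getElem_replicate, List.length_replicate]

-- seeding preserves the table's shape, whatever the (possibly negative, possibly
-- out-of-range) Python indices of a row are
theorem pvShape_setCell_any {dp : List (List Int)} {M N : Nat} (hs : pvShape dp M N)
    (h w : Int) (v : Int) : pvShape (pvSetCell dp h w v) M N := by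
  rw [pvSetCell, PySem.List.pySetD, PySem.List.pySet?]
  cases hk : PySem.List.pyIdx? dp.length h with
  | none => simpa [hk] using hs
  | some k =>
    simp only [hk, Option.map_some, Option.getD_some]
    refine ⟨by rw [List.length_set]; exact hs.1, ?_⟩
    intro a ha
    rw [List.getElem_set]
    split
    · rw [PySem.List.length_pySetD]
      have hin : PySem.Raise.InRange dp.length h := by
        rw [PySem.List.pyIdx?] at hk
        simp only [PySem.Raise.InRange]
        split_ifs at hk <;> omega
      have hmem := PySem.List.pyGetD_mem dp ([] : List Int) (i := h) hin
      obtain ⟨a', ha', he⟩ := List.mem_iff_getElem.1 hmem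
      rw [← he]
      exact hs.2 _ ha'
    · exact hs.2 _ (by simpa using ha)

theorem pvShape_seed : ∀ (rows : List (List Int)) (dp : List (List Int)) (M N : Nat),
    pvShape dp M N → pvShape (rows.foldl pvSeedStep dp) M N := by
  intro rows
  induction rows with
  | nil => intro dp M N hs; exact hs
  | cons r rs IH =>
    intro dp M N hs
    simp only [List.foldl_cons]
    apply IH
    match r with
    | [] => exact hs
    | [_] => exact hs
    | [_, _] => exact hs
    | h :: w :: v :: _ :: _ => exact hs
    | [h, w, v] => exact pvShape_setCell_any hs h w v

-- seeding a degenerate block (all priced pieces at (m, n), nonnegative): every other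
-- in-range cell stays 0 and cell (m, n) stays nonnegative
theorem pvGridDeg (m n : Int) (hm : 0 ≤ m) (hn : 0 ≤ n) :
    ∀ (rows : List (List Int)),
      (∀ row ∈ rows, row.length = 3 ∧ row.getD 0 0 = m ∧ row.getD 1 0 = n ∧ 0 ≤ row.getD 2 0) →
      ∀ dp : List (List Int), pvShape dp (m + 1).toNat (n + 1).toNat →
        (∀ a b : Int, 0 ≤ a → a ≤ m → 0 ≤ b → b ≤ n → ¬(a = m ∧ b = n) → pvCell dp a b = 0) →
        0 ≤ pvCell dp m n →
        (∀ a b : Int, 0 ≤ a → a ≤ m → 0 ≤ b → b ≤ n → ¬(a = m ∧ b = n) →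
          pvCell (rows.foldl pvSeedStep dp) a b = 0) ∧
        0 ≤ pvCell (rows.foldl pvSeedStep dp) m n := by
  intro rows
  induction rows with
  | nil => intro _ dp _ h0 h1; exact ⟨h0, h1⟩
  | cons r rs IH =>
    intro hmem dp hs h0 h1
    obtain ⟨hlen, hA, hB, hC⟩ := hmem r (List.mem_cons_self ..)
    match r, hlen with
    | [a, b, c], _ =>
      rw [show ([a, b, c] : List Int).getD 0 0 = a from rfl] at hA
      rw [show ([a, b, c] : List Int).getD 1 0 = b from rfl] at hB
      rw [show ([a, b, c] : List Int).getD 2 0 = c from rfl] at hC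
      subst hA; subst hB
      simp only [List.foldl_cons, pvSeedStep]
      apply IH (fun y hy => hmem y (List.mem_cons_of_mem _ hy))
      · exact pvShape_setCell hs c hm (by omega) hn (by omega)
      · intro x y hx1 hx2 hy1 hy2 hxy
        rw [pvCell_setCell hs c hm (by omega) hn (by omega) hx1 (by omega) hy1 (by omega),
          if_neg hxy]
        exact h0 x y hx1 hx2 hy1 hy2 hxy
      · rw [pvCell_setCell hs c hm (by omega) hn (by omega) hm (by omega) hn (by omega),
          if_pos ⟨rfl, rfl⟩]
        exact hC

-- ===== the DP loops compute pvB =====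

-- processed-region value: cells strictly before (I, J) in row-major order hold the optimum, the rest the seed
def pvF (p : Int → Int → Int) (I J a b : Int) : Int :=
  if 1 ≤ a ∧ 1 ≤ b ∧ (a < I ∨ (a = I ∧ b < J)) then pvB p a b else p a b

def pvRel (p : Int → Int → Int) (m n I J : Int) (dp : List (List Int)) : Prop :=
  pvShape dp (m + 1).toNat (n + 1).toNat ∧
  ∀ a b : Int, 0 ≤ a → a ≤ m → 0 ≤ b → b ≤ n → pvCell dp a b = pvF p I J a b

theorem pvLoopNi (p : Int → Int → Int) (m n i j : Int) (hi1 : 1 ≤ i) (him : i ≤ m) (hj1 : 1 ≤ j) (hjn : j ≤ n) :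
    ∀ (L : List Int), (∀ x ∈ L, 1 ≤ x ∧ 2 ≤ i ∧ x < i ∧ 1 ≤ i - x ∧ i - x < i) →
    ∀ dp : List (List Int),
      pvShape dp (m + 1).toNat (n + 1).toNat →
      (∀ a b : Int, 0 ≤ a → a ≤ m → 0 ≤ b → b ≤ n → ¬(a = i ∧ b = j) → pvCell dp a b = pvF p i j a b) →
      pvShape (L.foldl (fun dp ni => pvSetCell dp i j (max (pvCell dp i j) (pvCell dp ni j + pvCell dp (i - ni) j))) dp) (m + 1).toNat (n + 1).toNat ∧
      (∀ a b : Int, 0 ≤ a → a ≤ m → 0 ≤ b → b ≤ n → ¬(a = i ∧ b = j) →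
        pvCell (L.foldl (fun dp ni => pvSetCell dp i j (max (pvCell dp i j) (pvCell dp ni j + pvCell dp (i - ni) j))) dp) a b = pvF p i j a b) ∧
      pvCell (L.foldl (fun dp ni => pvSetCell dp i j (max (pvCell dp i j) (pvCell dp ni j + pvCell dp (i - ni) j))) dp) i j
        = L.foldl (fun acc ni => max acc (pvF p i j ni j + pvF p i j (i - ni) j)) (pvCell dp i j) := by
  intro L
  induction L with
  | nil => intro _ dp hs hoth; exact ⟨hs, hoth, rfl⟩
  | cons x xs IHL =>
    intro hmem dp hs hoth
    obtain ⟨hx1, hx2, hx3, hx4, hx5⟩ := hmem x (List.mem_cons_self ..)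
    have hrx : pvCell dp x j = pvF p i j x j :=
      hoth x j (by omega) (by omega) (by omega) hjn (fun hc => absurd hc.1 (by omega))
    have hry : pvCell dp (i - x) j = pvF p i j (i - x) j :=
      hoth (i - x) j (by omega) (by omega) (by omega) hjn (fun hc => absurd hc.1 (by omega))
    simp only [List.foldl_cons]
    rw [hrx, hry]
    have hs' := pvShape_setCell hs (max (pvCell dp i j) (pvF p i j x j + pvF p i j (i - x) j))
      (show (0:Int) ≤ i by omega) (by omega) (show (0:Int) ≤ j by omega) (by omega)
    have hoth' : ∀ a b : Int, 0 ≤ a → a ≤ m → 0 ≤ b → b ≤ n → ¬(a = i ∧ b = j) →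
        pvCell (pvSetCell dp i j (max (pvCell dp i j) (pvF p i j x j + pvF p i j (i - x) j))) a b
          = pvF p i j a b := by
      intro a b h1 h2 h3 h4 h5
      rw [pvCell_setCell hs _ (show (0:Int) ≤ i by omega) (by omega) (show (0:Int) ≤ j by omega)
        (by omega) h1 (by omega) h3 (by omega), if_neg h5]
      exact hoth a b h1 h2 h3 h4 h5
    obtain ⟨A1, A2, A3⟩ := IHL (fun y hy => hmem y (List.mem_cons_of_mem _ hy)) _ hs' hoth'
    refine ⟨A1, A2, ?_⟩
    rw [A3, pvCell_setCell hs _ (show (0:Int) ≤ i by omega) (by omega) (show (0:Int) ≤ j by omega)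
      (by omega) (show (0:Int) ≤ i by omega) (by omega) (show (0:Int) ≤ j by omega) (by omega),
      if_pos ⟨rfl, rfl⟩]

theorem pvLoopNj (p : Int → Int → Int) (m n i j : Int) (hi1 : 1 ≤ i) (him : i ≤ m) (hj1 : 1 ≤ j) (hjn : j ≤ n) :
    ∀ (L : List Int), (∀ x ∈ L, 1 ≤ x ∧ 2 ≤ j ∧ x < j ∧ 1 ≤ j - x ∧ j - x < j) →
    ∀ dp : List (List Int),
      pvShape dp (m + 1).toNat (n + 1).toNat →
      (∀ a b : Int, 0 ≤ a → a ≤ m → 0 ≤ b → b ≤ n → ¬(a = i ∧ b = j) → pvCell dp a b = pvF p i j a b) →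
      pvShape (L.foldl (fun dp nj => pvSetCell dp i j (max (pvCell dp i j) (pvCell dp i nj + pvCell dp i (j - nj)))) dp) (m + 1).toNat (n + 1).toNat ∧
      (∀ a b : Int, 0 ≤ a → a ≤ m → 0 ≤ b → b ≤ n → ¬(a = i ∧ b = j) →
        pvCell (L.foldl (fun dp nj => pvSetCell dp i j (max (pvCell dp i j) (pvCell dp i nj + pvCell dp i (j - nj)))) dp) a b = pvF p i j a b) ∧
      pvCell (L.foldl (fun dp nj => pvSetCell dp i j (max (pvCell dp i j) (pvCell dp i nj + pvCell dp i (j - nj)))) dp) i j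
        = L.foldl (fun acc nj => max acc (pvF p i j i nj + pvF p i j i (j - nj))) (pvCell dp i j) := by
  intro L
  induction L with
  | nil => intro _ dp hs hoth; exact ⟨hs, hoth, rfl⟩
  | cons x xs IHL =>
    intro hmem dp hs hoth
    obtain ⟨hx1, hx2, hx3, hx4, hx5⟩ := hmem x (List.mem_cons_self ..)
    have hrx : pvCell dp i x = pvF p i j i x :=
      hoth i x (by omega) him (by omega) (by omega) (fun hc => absurd hc.2 (by omega))
    have hry : pvCell dp i (j - x) = pvF p i j i (j - x) :=
      hoth i (j - x) (by omega) him (by omega) (by omega) (fun hc => absurd hc.2 (by omega))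
    simp only [List.foldl_cons]
    rw [hrx, hry]
    have hs' := pvShape_setCell hs (max (pvCell dp i j) (pvF p i j i x + pvF p i j i (j - x)))
      (show (0:Int) ≤ i by omega) (by omega) (show (0:Int) ≤ j by omega) (by omega)
    have hoth' : ∀ a b : Int, 0 ≤ a → a ≤ m → 0 ≤ b → b ≤ n → ¬(a = i ∧ b = j) →
        pvCell (pvSetCell dp i j (max (pvCell dp i j) (pvF p i j i x + pvF p i j i (j - x)))) a b
          = pvF p i j a b := by
      intro a b h1 h2 h3 h4 h5
      rw [pvCell_setCell hs _ (show (0:Int) ≤ i by omega) (by omega) (show (0:Int) ≤ j by omega)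
        (by omega) h1 (by omega) h3 (by omega), if_neg h5]
      exact hoth a b h1 h2 h3 h4 h5
    obtain ⟨A1, A2, A3⟩ := IHL (fun y hy => hmem y (List.mem_cons_of_mem _ hy)) _ hs' hoth'
    refine ⟨A1, A2, ?_⟩
    rw [A3, pvCell_setCell hs _ (show (0:Int) ≤ i by omega) (by omega) (show (0:Int) ≤ j by omega)
      (by omega) (show (0:Int) ≤ i by omega) (by omega) (show (0:Int) ≤ j by omega) (by omega),
      if_pos ⟨rfl, rfl⟩]

theorem pvStepCell (p : Int → Int → Int) (m n : Int) (hm : 0 ≤ m) (hn : 0 ≤ n) (i j : Int)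
    (hi1 : 1 ≤ i) (him : i ≤ m) (hj1 : 1 ≤ j) (hjn : j ≤ n) (dp : List (List Int))
    (hrel : pvRel p m n i j dp) :
    pvRel p m n i (j + 1)
      ((PySem.List.pyRange 1 (PySem.Int.floordiv j 2 + 1) 1).foldl
        (fun dp nj => pvSetCell dp i j (max (pvCell dp i j) (pvCell dp i nj + pvCell dp i (j - nj))))
        ((PySem.List.pyRange 1 (PySem.Int.floordiv i 2 + 1) 1).foldl
          (fun dp ni => pvSetCell dp i j (max (pvCell dp i j) (pvCell dp ni j + pvCell dp (i - ni) j))) dp)) := by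
  obtain ⟨hs, hcells⟩ := hrel
  have hoth : ∀ a b : Int, 0 ≤ a → a ≤ m → 0 ≤ b → b ≤ n → ¬(a = i ∧ b = j) →
      pvCell dp a b = pvF p i j a b := fun a b h1 h2 h3 h4 _ => hcells a b h1 h2 h3 h4
  have hstart : pvCell dp i j = p i j := by
    rw [hcells i j (by omega) him (by omega) hjn, pvF, if_neg (by omega)]
  obtain ⟨s1, o1, c1⟩ := pvLoopNi p m n i j hi1 him hj1 hjn _
    (fun x hx => pvMemRange (by omega) hx) dp hs hoth
  obtain ⟨s2, o2, c2⟩ := pvLoopNj p m n i j hi1 him hj1 hjn _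
    (fun x hx => pvMemRange (by omega) hx) _ s1 o1
  refine ⟨s2, ?_⟩
  intro a b h1 h2 h3 h4
  by_cases hab : a = i ∧ b = j
  · obtain ⟨rfl, rfl⟩ := hab
    rw [c2, c1, hstart, pvF, if_pos (by omega)]
    rw [pvB_unfold p a b (by omega) (by omega)]
    have e1 := PySem.List.foldl_congr_mem (PySem.List.pyRange 1 (PySem.Int.floordiv a 2 + 1) 1)
      (fun acc ni => max acc (pvF p a b ni b + pvF p a b (a - ni) b))
      (fun acc ni => max acc (pvB p ni b + pvB p (a - ni) b)) (p a b)
      (fun acc x hx => by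
        obtain ⟨k1, k2, k3, k4, k5⟩ := pvMemRange (show (0:Int) ≤ a by omega) hx
        show max acc (pvF p a b x b + pvF p a b (a - x) b) = max acc (pvB p x b + pvB p (a - x) b)
        rw [pvF, if_pos (by omega), pvF, if_pos (by omega)])
    rw [e1]
    apply PySem.List.foldl_congr_mem
    intro acc x hx
    obtain ⟨k1, k2, k3, k4, k5⟩ := pvMemRange (show (0:Int) ≤ b by omega) hx
    show max acc (pvF p a b a x + pvF p a b a (b - x)) = max acc (pvB p a x + pvB p a (b - x))
    rw [pvF, if_pos (by omega), pvF, if_pos (by omega)]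
  · have hne : a ≠ i ∨ b ≠ j := by tauto
    rw [o2 a b h1 h2 h3 h4 hab, pvF, pvF]
    by_cases hcond : 1 ≤ a ∧ 1 ≤ b ∧ (a < i ∨ a = i ∧ b < j)
    · rw [if_pos hcond, if_pos (by omega)]
    · rw [if_neg hcond, if_neg (by omega)]

theorem pvLoopJ (p : Int → Int → Int) (m n i : Int) (hm : 0 ≤ m) (hn : 0 ≤ n)
    (hi1 : 1 ≤ i) (him : i ≤ m) :
    ∀ (k : Nat) (J : Int) (dp : List (List Int)), 1 ≤ J → J + k = n + 1 →
      pvRel p m n i J dp →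
      pvRel p m n i (n + 1)
        ((PySem.List.pyRange J (n + 1) 1).foldl
          (fun dp j => (PySem.List.pyRange 1 (PySem.Int.floordiv j 2 + 1) 1).foldl
            (fun dp nj => pvSetCell dp i j (max (pvCell dp i j) (pvCell dp i nj + pvCell dp i (j - nj))))
            ((PySem.List.pyRange 1 (PySem.Int.floordiv i 2 + 1) 1).foldl
              (fun dp ni => pvSetCell dp i j (max (pvCell dp i j) (pvCell dp ni j + pvCell dp (i - ni) j))) dp)) dp) := by
  intro k
  induction k with
  | zero =>
    intro J dp hJ1 hJk hrel
    have hJ : J = n + 1 := by omega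
    subst hJ
    rw [PySem.List.pyRange_one_eq_nil (le_refl _), List.foldl_nil]
    exact hrel
  | succ k IH =>
    intro J dp hJ1 hJk hrel
    rw [PySem.List.pyRange_one_cons (by omega : J < n + 1), List.foldl_cons]
    exact IH (J + 1) _ (by omega) (by omega)
      (pvStepCell p m n hm hn i J hi1 him hJ1 (by omega) dp hrel)

theorem pvRelNext (p : Int → Int → Int) (m n i : Int) (hn : 0 ≤ n) {dp : List (List Int)}
    (h : pvRel p m n i (n + 1) dp) : pvRel p m n (i + 1) 1 dp := by
  refine ⟨h.1, ?_⟩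
  intro a b h1 h2 h3 h4
  rw [h.2 a b h1 h2 h3 h4, pvF, pvF]
  by_cases hcond : 1 ≤ a ∧ 1 ≤ b ∧ (a < i ∨ a = i ∧ b < n + 1)
  · rw [if_pos hcond, if_pos (by omega)]
  · rw [if_neg hcond, if_neg (by omega)]

theorem pvLoopI (p : Int → Int → Int) (m n : Int) (hm : 0 ≤ m) (hn : 0 ≤ n) :
    ∀ (k : Nat) (I : Int) (dp : List (List Int)), 1 ≤ I → I + k = m + 1 →
      pvRel p m n I 1 dp →
      pvRel p m n (m + 1) 1
        ((PySem.List.pyRange I (m + 1) 1).foldl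
          (fun dp i => (PySem.List.pyRange 1 (n + 1) 1).foldl
            (fun dp j => (PySem.List.pyRange 1 (PySem.Int.floordiv j 2 + 1) 1).foldl
              (fun dp nj => pvSetCell dp i j (max (pvCell dp i j) (pvCell dp i nj + pvCell dp i (j - nj))))
              ((PySem.List.pyRange 1 (PySem.Int.floordiv i 2 + 1) 1).foldl
                (fun dp ni => pvSetCell dp i j (max (pvCell dp i j) (pvCell dp ni j + pvCell dp (i - ni) j))) dp)) dp) dp) := by
  intro k
  induction k with
  | zero =>
    intro I dp hI1 hIk hrel
    have hI : I = m + 1 := by omega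
    subst hI
    rw [PySem.List.pyRange_one_eq_nil (le_refl _), List.foldl_nil]
    exact hrel
  | succ k IH =>
    intro I dp hI1 hIk hrel
    rw [PySem.List.pyRange_one_cons (by omega : I < m + 1), List.foldl_cons]
    refine IH (I + 1) _ (by omega) (by omega) ?_
    refine pvRelNext p m n I hn ?_
    exact pvLoopJ p m n I hm hn hI1 (by omega) n.toNat 1 dp (by omega) (by omega) hrel

theorem pvCell_last {dp : List (List Int)} {M N : Nat} (hs : pvShape dp M N)
    (hM : 0 < M) (hN : 0 < N) :
    pvCell dp (-1) (-1) = pvCell dp ((M : Int) - 1) ((N : Int) - 1) := by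
  have hL : dp.length = M := hs.1
  have hne : dp ≠ [] := by
    intro h
    rw [h] at hL
    simp at hL
    omega
  have hrow : dp[dp.length - 1].length = N := hs.2 _ (by omega)
  have hrne : dp[dp.length - 1] ≠ [] := by
    intro h
    rw [h] at hrow
    simp at hrow
    omega
  rw [pvCell, PySem.List.pyGetD_neg_one dp [] hne, List.getLast_eq_getElem,
    PySem.List.pyGetD_neg_one _ 0 hrne, List.getLast_eq_getElem,
    pvCell_eq hs (by omega) (by omega) (by omega) (by omega),
    List.getD_eq_getElem dp [] (by omega)]
  have e1 : ((M : Int) - 1).toNat = dp.length - 1 := by omega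
  have hrow2 : dp[((M : Int) - 1).toNat].length = N := hs.2 _ (by omega)
  rw [List.getD_eq_getElem _ 0 (by rw [hrow2]; omega)]
  have e2 : ((N : Int) - 1).toNat = N - 1 := by omega
  simp only [e1, e2, hrow]

theorem pvFoldlConst {α β : Type} : ∀ (L : List β) (x : α), L.foldl (fun a _ => a) x = x := by
  intro L
  induction L with
  | nil => intro x; rfl
  | cons y ys IH => intro x; simpa using IH x

-- ===== VERDICT (by name: the statement is the Claim_ definition above) =====
theorem sellingWood3_spec : Claim_equal_sellingWood3 := by
  unfold Claim_equal_sellingWood3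
  intro m n prices hdom hpre
  unfold Spec_sellingWood3
  obtain ⟨hm, hn, hdeg, hrows⟩ := hpre
  rw [pvAlt m n prices hm hn]
  have hsh1 : pvShape
      (prices.foldl pvSeedStep (List.replicate (m + 1).toNat (List.replicate (n + 1).toNat 0)))
      (m + 1).toNat (n + 1).toNat :=
    pvShape_seed prices _ _ _ (pvShape_rep m n)
  have hlast := pvCell_last hsh1 (by omega) (by omega)
  have e1 : (((m + 1).toNat : Int) - 1) = m := by omega
  have e2 : (((n + 1).toNat : Int) - 1) = n := by omega
  rw [e1, e2] at hlast
  by_cases hdg : m = 0 ∨ n = 0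
  · -- degenerate block (m = 0 or n = 0): the DP loops never run; A returns the seeded
    -- table entry at (m, n), and B's recursion computes the same value there
    have hA : sellingWood3 m n prices = pvCell
        (prices.foldl pvSeedStep (List.replicate (m + 1).toNat (List.replicate (n + 1).toNat 0)))
        m n := by
      simp only [sellingWood3]
      rcases hdg with hm0 | hn0
      · subst hm0
        have hr : PySem.List.pyRange 1 ((0 : Int) + 1) 1 = [] :=
          PySem.List.pyRange_one_eq_nil (by omega)
        rw [hr, List.foldl_nil, hlast]
      · subst hn0
        have hr : PySem.List.pyRange 1 ((0 : Int) + 1) 1 = [] :=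
          PySem.List.pyRange_one_eq_nil (by omega)
        simp only [hr, List.foldl_nil, pvFoldlConst]
        rw [hlast]
    rw [hA]
    by_cases hsm : m ≤ 1 ∧ n ≤ 1
    · rw [pvB_small _ m n hm hsm.1 hn hsm.2]
    · have hdegrows : ∀ row ∈ prices, row.length = 3 ∧ row.getD 0 0 = m ∧ row.getD 1 0 = n ∧
          0 ≤ row.getD 2 0 := by
        intro row hrow
        obtain ⟨q1, q2, q3⟩ := ((hdeg hdg).resolve_left hsm) row hrow
        exact ⟨(hrows row hrow).1, q1, q2, q3⟩
      obtain ⟨hz, hpos⟩ := pvGridDeg m n hm hn prices hdegrows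
        (List.replicate (m + 1).toNat (List.replicate (n + 1).toNat 0)) (pvShape_rep m n)
        (by intro a b _ _ _ _ _; rw [pvCell_rep]) (by rw [pvCell_rep])
      rcases hdg with hm0 | hn0
      · subst hm0
        rw [pvB_degRow (fun a b => pvCell
            (prices.foldl pvSeedStep (List.replicate ((0:Int) + 1).toNat (List.replicate (n + 1).toNat 0))) a b) n
          (fun b hb0 hbn => hz 0 b (le_refl 0) (le_refl 0) hb0 (by omega)
            (fun hc => absurd hc.2 (by omega))) hn hpos]
      · subst hn0
        rw [pvB_degCol (fun a b => pvCell
            (prices.foldl pvSeedStep (List.replicate (m + 1).toNat (List.replicate ((0:Int) + 1).toNat 0))) a b) m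
          (fun a ha0 ham => hz a 0 ha0 (by omega) (le_refl 0) (le_refl 0)
            (fun hc => absurd hc.1 (by omega))) hm hpos]
  · have hm1 : 1 ≤ m := by omega
    have hn1 : 1 ≤ n := by omega
    have hrel1 : pvRel (fun a b => pvCell
        (prices.foldl pvSeedStep (List.replicate (m + 1).toNat (List.replicate (n + 1).toNat 0))) a b)
        m n 1 1
        (prices.foldl pvSeedStep (List.replicate (m + 1).toNat (List.replicate (n + 1).toNat 0))) := by
      refine ⟨hsh1, ?_⟩
      intro a b h1 h2 h3 h4
      rw [pvF, if_neg (by omega)]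
    have hfin := pvLoopI (fun a b => pvCell
        (prices.foldl pvSeedStep (List.replicate (m + 1).toNat (List.replicate (n + 1).toNat 0))) a b)
        m n hm hn m.toNat 1 _ (by omega) (by omega) hrel1
    have hcell := hfin.2 m n hm (le_refl m) hn (le_refl n)
    rw [pvF, if_pos (by omega)] at hcell
    have hlast2 := pvCell_last hfin.1 (by omega) (by omega)
    rw [e1, e2] at hlast2
    simp only [sellingWood3]
    rw [hlast2, hcell]
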